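-- pv_equiv track=rewrite | github.com/MathRdt/advent-of-code | src/2023/14/part_two.py | rotate_and_tilt_counter_clockwise
-- ===== SOURCE A (Python) =====
-- def rotate_and_tilt_counter_clockwise(input_matrix: list[list[str]]) -> tuple[tuple[str]]:
--     inversed_transposed_matrix = [list(line)[::-1] for line in zip(*input_matrix)]
--
--     for line in inversed_transposed_matrix:
--         mobile_rocks = [i for i, x in enumerate(line) if x == "O"][::-1]
--         for mobile_rock in mobile_rocks:
--             new_index = mobile_rock
--             while new_index + 1 < len(line):
--                 if line[new_index + 1] != ".":
--                     break
--                 new_index += 1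
--             if new_index != mobile_rock:
--                 line[new_index] = "O"
--                 line[mobile_rock] = "."
--     return tuple(tuple(line) for line in inversed_transposed_matrix)
-- ===== SOURCE B (Python) =====
-- def rotate_and_tilt_counter_clockwise(input_matrix: list[list[str]]) -> tuple[tuple[str]]:
--     # Single counting pass per column: count dots/rocks between barriers and emit each
--     # segment as dots followed by rocks (rocks roll to the high end).
--     if not input_matrix:
--         return ()
--     width = min(len(row) for row in input_matrix)
--     result = []
--     for j in range(width):
--         tilted = []
--         dots = rocks = 0
--         for row in reversed(input_matrix):
--             x = row[j]
--             if x == ".":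
--                 dots += 1
--             elif x == "O":
--                 rocks += 1
--             else:
--                 tilted.extend(["."] * dots + ["O"] * rocks)
--                 tilted.append(x)
--                 dots = rocks = 0
--         tilted.extend(["."] * dots + ["O"] * rocks)
--         result.append(tuple(tilted))
--     return tuple(result)
-- ===== Notes on version B (the rewrite author's own statement) =====
-- stated objective: alternative
-- what changed: Replaces the per-rock rightward while-scan over each rotated line by a single counting pass per column that emits each barrier-delimited segment as dots followed by rocks.
import Mathlib
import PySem

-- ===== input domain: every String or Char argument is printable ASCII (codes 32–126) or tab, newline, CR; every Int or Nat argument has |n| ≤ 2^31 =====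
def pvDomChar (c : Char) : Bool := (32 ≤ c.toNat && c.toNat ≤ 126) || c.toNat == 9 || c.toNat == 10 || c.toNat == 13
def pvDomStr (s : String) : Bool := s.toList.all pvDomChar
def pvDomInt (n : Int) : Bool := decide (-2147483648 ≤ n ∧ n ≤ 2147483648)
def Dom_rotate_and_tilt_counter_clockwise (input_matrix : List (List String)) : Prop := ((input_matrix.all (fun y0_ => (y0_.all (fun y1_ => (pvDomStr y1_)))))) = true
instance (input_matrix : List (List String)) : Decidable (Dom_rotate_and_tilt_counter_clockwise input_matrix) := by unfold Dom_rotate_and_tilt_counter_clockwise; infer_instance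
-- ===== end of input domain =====

-- B replaces A's per-rock rightward while-scan by one counting pass per column; return-value equivalence (A mutates only lists it builds itself).

-- ===== PORT A =====

-- zip(*input_matrix): variadic zip, ported by hand step for step (stops at the shortest row); exact.
def pvZipStar (m : List (List String)) : List (List String) :=
  if h : m ≠ [] ∧ m.all (fun l => !l.isEmpty) then
    (m.map (fun l => l.headD "")) :: pvZipStar (m.map (fun l => l.tail))
  else []
termination_by (m.headD []).length
decreasing_by
  · rcases m with _ | ⟨a, rest⟩
    · exact absurd rfl h.1
    · simp only [List.all_cons, Bool.and_eq_true] at h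
      rcases a with _ | ⟨x, xs⟩
      · simp at h
      · simp [List.headD]

-- the inner while-loop: advance new_index while the next cell is "."
-- (index is guarded by 'new_index + 1 < len(line)', always in range; exact)
def pvAdv (line : List String) (n : Nat) : Nat :=
  if h : n + 1 < line.length then
    if line.getD (n + 1) "" = "." then pvAdv line (n + 1) else n
  else n
termination_by line.length - n

-- one iteration of 'for mobile_rock in mobile_rocks'
def pvStep (line : List String) (rock : Nat) : List String :=
  let ni := pvAdv line rock
  if ni ≠ rock then (line.set ni "O").set rock "." else line

-- [i for i, x in enumerate(line) if x == "O"][::-1]; enumerate indices are ≥ 0 so .toNat is exact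
def pvRocks (line : List String) : List Nat :=
  ((PySem.List.enumerate line 0).filterMap
    (fun p => if p.2 = "O" then some p.1.toNat else none)).reverse

def pvTiltLine (line : List String) : List String :=
  (pvRocks line).foldl pvStep line

def rotate_and_tilt_counter_clockwise (input_matrix : List (List String)) : List (List String) :=
  -- inversed_transposed_matrix = [list(line)[::-1] for line in zip(*input_matrix)]
  let itm := (pvZipStar input_matrix).map (fun line => line.reverse)
  itm.map pvTiltLine

-- ===== PORT B =====

-- inner loop body of Source B: running (tilted, dots, rocks) state
def pvStepB (st : List String × Nat × Nat) (x : String) : List String × Nat × Nat :=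
  let (res, d, r) := st
  if x = "." then (res, d + 1, r)
  else if x = "O" then (res, d, r + 1)
  else (res ++ List.replicate d "." ++ List.replicate r "O" ++ [x], 0, 0)

def pvTiltCol (col : List String) : List String :=
  let st := col.foldl pvStepB ([], 0, 0)
  st.1 ++ List.replicate st.2.1 "." ++ List.replicate st.2.2 "O"

def rotate_and_tilt_counter_clockwise_alt (input_matrix : List (List String)) : List (List String) :=
  match input_matrix with
  | [] => []
  | _ :: _ =>
    -- width = min(len(row) for row in input_matrix): min over a nonempty list, .getD never fires
    let width := (PySem.List.min? (input_matrix.map (fun row => (row.length : Int))) (fun x => x)).getD 0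
    (PySem.List.pyRange 0 width 1).map (fun j =>
      -- row[j]: 0 ≤ j < width ≤ len(row), always in range; pyGetD exact
      pvTiltCol (input_matrix.reverse.map (fun row => PySem.List.pyGetD row j "")))

-- ===== PRECONDITION & SPEC =====
def Spec_rotate_and_tilt_counter_clockwise (input_matrix : List (List String)) (out : List (List String)) : Prop := out = rotate_and_tilt_counter_clockwise_alt input_matrix
instance (input_matrix : List (List String)) (out : List (List String)) : Decidable (Spec_rotate_and_tilt_counter_clockwise input_matrix out) := by unfold Spec_rotate_and_tilt_counter_clockwise; infer_instance

-- ===== CLAIM (what is proved, stated in full; the proofs are below) =====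
def Claim_equal_rotate_and_tilt_counter_clockwise : Prop := ∀ (input_matrix : List (List String)), Dom_rotate_and_tilt_counter_clockwise input_matrix → Spec_rotate_and_tilt_counter_clockwise input_matrix (rotate_and_tilt_counter_clockwise input_matrix)

-- ===== LEMMAS AND PROOFS =====

-- a cell over which rocks can roll
def pvFree (x : String) : Bool := x == "." || x == "O"

-- ascending indices of "O" in l, offset by s
def pvIdxs : List String → Nat → List Nat
  | [], _ => []
  | x :: t, s => if x = "O" then s :: pvIdxs t (s + 1) else pvIdxs t (s + 1)

-- recursive specification of B's column pass
def pvAux : List String → Nat → Nat → List String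
  | [], d, r => List.replicate d "." ++ List.replicate r "O"
  | x :: t, d, r =>
    if x = "." then pvAux t (d + 1) r
    else if x = "O" then pvAux t d (r + 1)
    else List.replicate d "." ++ List.replicate r "O" ++ x :: pvAux t 0 0

-- min row length (Nat form of B's width)
def pvMinLen : List (List String) → Nat
  | [] => 0
  | a :: rest => (rest.map List.length).foldl min a.length

lemma pvB_foldl (col : List String) : ∀ (res : List String) (d r : Nat),
    (let st := col.foldl pvStepB (res, d, r)
     st.1 ++ List.replicate st.2.1 "." ++ List.replicate st.2.2 "O") = res ++ pvAux col d r := by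
  induction col with
  | nil => intro res d r; simp [pvAux]
  | cons x t ih =>
    intro res d r
    by_cases hx : x = "."
    · simpa [pvStepB, pvAux, hx] using ih res (d + 1) r
    · by_cases hO : x = "O"
      · simpa [pvStepB, pvAux, hx, hO] using ih res d (r + 1)
      · simpa [pvStepB, pvAux, hx, hO] using
          ih (res ++ List.replicate d "." ++ List.replicate r "O" ++ [x]) 0 0

lemma pvTiltCol_eq_aux (col : List String) : pvTiltCol col = pvAux col 0 0 := by
  simpa [pvTiltCol] using pvB_foldl col [] 0 0

lemma pvRocks_eq_idxs (line : List String) : pvRocks line = (pvIdxs line 0).reverse := by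
  have h : ∀ (l : List String) (s : Nat),
      (PySem.List.enumerate l (s : Int)).filterMap
        (fun p => if p.2 = "O" then some p.1.toNat else none) = pvIdxs l s := by
    intro l
    induction l with
    | nil => intro s; simp [PySem.List.enumerate_nil, pvIdxs]
    | cons x t ih =>
      intro s
      have hs : (s : Int) + 1 = ((s + 1 : Nat) : Int) := by push_cast; ring
      rw [PySem.List.enumerate_cons]
      by_cases hx : x = "O" <;>
      · simp only [List.filterMap_cons, pvIdxs, hx, Int.toNat_natCast, reduceIte]
        rw [hs]
        simp only [ih (s + 1)]
  simpa [pvRocks] using congrArg List.reverse (h line 0)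

lemma pvIdxs_shift (l : List String) : ∀ s, pvIdxs l s = (pvIdxs l 0).map (· + s) := by
  have key : ∀ (l : List String) (s k : Nat), pvIdxs l (s + k) = (pvIdxs l s).map (· + k) := by
    intro l
    induction l with
    | nil => intro s k; simp [pvIdxs]
    | cons x t ih =>
      intro s k
      by_cases hx : x = "O" <;> simp [pvIdxs, hx, show s + k + 1 = (s + 1) + k by omega, ih (s + 1) k]
  intro s
  simpa using key l 0 s

lemma pvIdxs_append (a b : List String) (s : Nat) :
    pvIdxs (a ++ b) s = pvIdxs a s ++ pvIdxs b (s + a.length) := by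
  induction a generalizing s with
  | nil => simp [pvIdxs]
  | cons x t ih =>
    by_cases hx : x = "O" <;>
      simp [pvIdxs, hx, ih (s + 1), show s + 1 + t.length = s + (t.length + 1) by omega]

lemma pvIdxs_mem (l : List String) : ∀ (s p : Nat), p ∈ pvIdxs l s → s ≤ p ∧ p < s + l.length := by
  induction l with
  | nil => intro s p h; simp [pvIdxs] at h
  | cons x t ih =>
    intro s p h
    by_cases hx : x = "O" <;> simp [pvIdxs, hx] at h
    · rcases h with rfl | h
      · simp
      · have := ih (s + 1) p h; constructor <;> [omega; (simp; omega)]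
    · have := ih (s + 1) p h; constructor <;> [omega; (simp; omega)]

lemma pvIdxs_lt (l : List String) : ∀ p ∈ pvIdxs l 0, p < l.length := by
  intro p hp
  simpa using (pvIdxs_mem l 0 p hp).2

lemma pvIdxs_nil_of_no_rock (l : List String) (h : ∀ x ∈ l, x ≠ "O") : ∀ s, pvIdxs l s = [] := by
  induction l with
  | nil => intro s; simp [pvIdxs]
  | cons x t ih =>
    intro s
    have hx : x ≠ "O" := h x (by simp)
    simp [pvIdxs, hx, ih (fun y hy => h y (by simp [hy])) (s + 1)]

lemma pvSet_at_length (l : List String) (a b : String) (t : List String) :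
    (l ++ a :: t).set l.length b = l ++ b :: t := by
  induction l with
  | nil => simp
  | cons y l ih => simp [ih]

lemma pvSet_append_right (l t : List String) (k : Nat) (v : String) :
    (l ++ t).set (l.length + k) v = l ++ t.set k v := by
  induction l with
  | nil => simp
  | cons y l ih => simp [show y :: l ++ t = y :: (l ++ t) from rfl, List.length_cons,
      show l.length + 1 + k = (l.length + k) + 1 by omega, ih]

lemma pvSet_append_left (l t : List String) (k : Nat) (v : String) (h : k < l.length) :
    (l ++ t).set k v = l.set k v ++ t := by
  induction l generalizing k with
  | nil => simp at h
  | cons y l ih =>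
    cases k with
    | zero => simp [List.set]
    | succ k => simp only [List.length_cons] at h
                simp [List.set, ih k (by omega)]

lemma pvGetD_append_right (l t : List String) (k : Nat) :
    (l ++ t).getD (l.length + k) "" = t.getD k "" := by
  induction l with
  | nil => simp
  | cons x l ih => simpa [show l.length + 1 + k = (l.length + k) + 1 by omega] using ih

lemma pvGetD_append_left (l t : List String) (k : Nat) (h : k < l.length) :
    (l ++ t).getD k "" = l.getD k "" := by
  induction l generalizing k with
  | nil => simp at h
  | cons x l ih =>
    cases k with
    | zero => simp
    | succ k => simp only [List.length_cons] at h
                simpa using ih k (by omega)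

-- the while-loop runs over exactly the s dots behind the rock
lemma pvAdv_run : ∀ (s : Nat) (pre : List String) (x : String) (rest : List String),
    (rest = [] ∨ ∃ y t, rest = y :: t ∧ y ≠ ".") →
    pvAdv (pre ++ x :: List.replicate s "." ++ rest) pre.length = pre.length + s := by
  intro s
  induction s with
  | zero =>
    intro pre x rest hrest
    rcases hrest with rfl | ⟨y, t, rfl, hy⟩
    · conv_lhs => rw [pvAdv]
      simp
    · simp only [List.replicate_zero]
      conv_lhs => rw [pvAdv]
      have hlen : pre.length + 1 < (pre ++ [x] ++ y :: t).length := by simp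
      have hget : (pre ++ [x] ++ y :: t).getD (pre.length + 1) "" = y := by
        simpa using pvGetD_append_right pre (x :: y :: t) 1
      rw [dif_pos hlen, if_neg (by rw [hget]; exact hy)]
      omega
  | succ s ih =>
    intro pre x rest hrest
    have hshape : pre ++ x :: List.replicate (s + 1) "." ++ rest
        = (pre ++ [x]) ++ "." :: List.replicate s "." ++ rest := by
      simp [List.replicate_succ]
    conv_lhs => rw [pvAdv]
    have hlen : pre.length + 1 < (pre ++ x :: List.replicate (s + 1) "." ++ rest).length := by
      simp
    rw [dif_pos hlen]
    have hget : (pre ++ x :: List.replicate (s + 1) "." ++ rest).getD (pre.length + 1) "" = "." := by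
      have := pvGetD_append_right pre (x :: List.replicate (s + 1) "." ++ rest) 1
      simpa [List.replicate_succ] using this
    rw [if_pos hget]
    have := ih (pre ++ [x]) "." rest hrest
    rw [hshape, show pre.length + (s + 1) = pre.length + 1 + s by omega]
    simpa using this

lemma pvAdv_offset (pre t : List String) : ∀ p, p < t.length →
    pvAdv (pre ++ t) (pre.length + p) = pre.length + pvAdv t p := by
  have key : ∀ (k p : Nat), t.length - p ≤ k → p < t.length →
      pvAdv (pre ++ t) (pre.length + p) = pre.length + pvAdv t p := by
    intro k
    induction k with
    | zero => intro p hk hp; omega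
    | succ k ih =>
      intro p hk hp
      conv_lhs => rw [pvAdv]
      conv_rhs => rw [pvAdv]
      by_cases h1 : p + 1 < t.length
      · have h1' : pre.length + p + 1 < (pre ++ t).length := by simp; omega
        rw [dif_pos h1', dif_pos h1]
        have hget : (pre ++ t).getD (pre.length + p + 1) "" = t.getD (p + 1) "" := by
          simpa [show pre.length + p + 1 = pre.length + (p + 1) by omega]
            using pvGetD_append_right pre t (p + 1)
        rw [hget]
        by_cases h2 : t.getD (p + 1) "" = "."
        · rw [if_pos h2, if_pos h2]
          have := ih (p + 1) (by omega) h1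
          simpa [show pre.length + p + 1 = pre.length + (p + 1) by omega] using this
        · rw [if_neg h2, if_neg h2]
      · have h1' : ¬ pre.length + p + 1 < (pre ++ t).length := by simp; omega
        rw [dif_neg h1', dif_neg h1]
  intro p hp
  exact key t.length p (by omega) hp

lemma pvAdv_lt (t : List String) : ∀ p, p < t.length → pvAdv t p < t.length := by
  have key : ∀ (k p : Nat), t.length - p ≤ k → p < t.length → pvAdv t p < t.length := by
    intro k
    induction k with
    | zero => intro p hk hp; omega
    | succ k ih =>
      intro p hk hp
      conv_lhs => rw [pvAdv]
      by_cases h1 : p + 1 < t.length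
      · rw [dif_pos h1]
        by_cases h2 : t.getD (p + 1) "" = "."
        · rw [if_pos h2]; exact ih (p + 1) (by omega) h1
        · rw [if_neg h2]; exact hp
      · rw [dif_neg h1]; exact hp
  intro p hp
  exact key t.length p (by omega) hp

lemma pvAdv_eq_prefix (seg : List String) (b : String) (t : List String) (hb : b ≠ ".") :
    ∀ p, p < seg.length → pvAdv (seg ++ b :: t) p = pvAdv seg p := by
  have key : ∀ (k p : Nat), seg.length - p ≤ k → p < seg.length →
      pvAdv (seg ++ b :: t) p = pvAdv seg p := by
    intro k
    induction k with
    | zero => intro p hk hp; omega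
    | succ k ih =>
      intro p hk hp
      conv_lhs => rw [pvAdv]
      conv_rhs => rw [pvAdv]
      by_cases h1 : p + 1 < seg.length
      · have h1' : p + 1 < (seg ++ b :: t).length := by simp; omega
        rw [dif_pos h1', dif_pos h1]
        rw [pvGetD_append_left seg (b :: t) (p + 1) h1]
        by_cases h2 : seg.getD (p + 1) "" = "."
        · rw [if_pos h2, if_pos h2]
          exact ih (p + 1) (by omega) h1
        · rw [if_neg h2, if_neg h2]
      · have hp1 : p + 1 = seg.length := by omega
        have h1' : p + 1 < (seg ++ b :: t).length := by simp; omega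
        rw [dif_pos h1', dif_neg h1]
        have hget : (seg ++ b :: t).getD (p + 1) "" = b := by
          simpa [hp1] using pvGetD_append_right seg (b :: t) 0
        rw [if_neg (by rw [hget]; exact hb)]
  intro p hp
  exact key seg.length p (by omega) hp

lemma pvStep_length (t : List String) (p : Nat) : (pvStep t p).length = t.length := by
  simp only [pvStep]
  by_cases h : pvAdv t p = p <;> simp [h]

lemma pvStep_shift (P t : List String) (p : Nat) (hp : p < t.length) :
    pvStep (P ++ t) (P.length + p) = P ++ pvStep t p := by
  simp only [pvStep]
  rw [pvAdv_offset P t p hp]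
  by_cases hne : pvAdv t p = p
  · simp [hne]
  · rw [if_pos (show P.length + pvAdv t p ≠ P.length + p by omega), if_pos hne]
    rw [pvSet_append_right P t (pvAdv t p) "O", pvSet_append_right P _ p "."]

lemma pvStep_prefix (seg : List String) (b : String) (t : List String) (hb : b ≠ ".")
    (p : Nat) (hp : p < seg.length) :
    pvStep (seg ++ b :: t) p = pvStep seg p ++ b :: t := by
  simp only [pvStep]
  rw [pvAdv_eq_prefix seg b t hb p hp]
  by_cases hne : pvAdv seg p = p
  · simp [hne]
  · have hlt := pvAdv_lt seg p hp
    rw [if_pos hne, if_pos hne]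
    rw [pvSet_append_left seg (b :: t) (pvAdv seg p) "O" hlt,
        pvSet_append_left _ (b :: t) p "." (by simpa using hp)]

-- phase 1: rocks strictly right of the barrier only move inside the suffix
lemma pvFold_suffix (pre : List String) (b : String) :
    ∀ (ps : List Nat) (t : List String), (∀ p ∈ ps, p < t.length) →
    List.foldl pvStep (pre ++ b :: t) (ps.map (· + (pre.length + 1)))
      = pre ++ b :: List.foldl pvStep t ps := by
  intro ps
  induction ps with
  | nil => intro t _; simp
  | cons p ps ih =>
    intro t hps
    have hp : p < t.length := hps p (by simp)
    have hstep : pvStep (pre ++ b :: t) (p + (pre.length + 1)) = pre ++ b :: pvStep t p := by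
      have h1 := pvStep_shift (pre ++ [b]) t p hp
      rw [show p + (pre.length + 1) = pre.length + 1 + p by omega]
      simpa using h1
    rw [List.map_cons, List.foldl_cons, List.foldl_cons, hstep]
    exact ih (pvStep t p) (fun q hq => by
      rw [pvStep_length]; exact hps q (by simp [hq]))

-- phase 2: rocks left of the barrier only move inside the prefix
lemma pvFold_prefix (b : String) (hb : b ≠ ".") :
    ∀ (ps : List Nat) (seg t : List String), (∀ p ∈ ps, p < seg.length) →
    List.foldl pvStep (seg ++ b :: t) ps = (List.foldl pvStep seg ps) ++ b :: t := by
  intro ps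
  induction ps with
  | nil => intro seg t _; simp
  | cons p ps ih =>
    intro seg t hps
    have hp : p < seg.length := hps p (by simp)
    rw [List.foldl_cons, List.foldl_cons, pvStep_prefix seg b t hb p hp]
    exact ih (pvStep seg p) t (fun q hq => by
      rw [pvStep_length]; exact hps q (by simp [hq]))

-- decomposition of a barrier-free block, last rock first
lemma pvDecomp (l : List String) (hl : ∀ x ∈ l, pvFree x = true) (hO : "O" ∈ l) :
    ∃ l' m, l = l' ++ "O" :: List.replicate m "." ∧ (∀ x ∈ l', pvFree x = true) := by
  induction l using List.reverseRecOn with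
  | nil => simp at hO
  | append_singleton init a ih =>
    have ha := hl a (by simp)
    have hinit : ∀ x ∈ init, pvFree x = true := fun y hy => hl y (by simp [hy])
    rcases (show a = "." ∨ a = "O" by simpa [pvFree] using ha) with ha' | ha'
    · have hO' : "O" ∈ init := by
        rcases (List.mem_append.1 hO) with h' | h'
        · exact h'
        · simp [ha'] at h'
      rcases ih hinit hO' with ⟨l', m, rfl, hl'⟩
      exact ⟨l', m + 1, by simp [ha', List.replicate_succ'], hl'⟩
    · exact ⟨init, 0, by simp [ha'], hinit⟩

-- core: A's per-rock fold on a barrier-free block sorts it into dots then rocks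
lemma pvCore : ∀ (n : Nat) (pre : List String), pre.length = n →
    (∀ x ∈ pre, pvFree x = true) → ∀ (d r : Nat),
    List.foldl pvStep (pre ++ List.replicate d "." ++ List.replicate r "O") (pvIdxs pre 0).reverse
      = List.replicate (pre.count "." + d) "." ++ List.replicate (pre.count "O" + r) "O" := by
  intro n
  induction n using Nat.strong_induction_on with
  | _ n IH =>
    intro pre hn hpure d r
    by_cases hO : "O" ∈ pre
    · -- last rock moves onto the accumulated dot block
      rcases pvDecomp pre hpure hO with ⟨l', m, rfl, hl'⟩
      have hidx : pvIdxs (l' ++ "O" :: List.replicate m ".") 0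
          = pvIdxs l' 0 ++ [l'.length] := by
        rw [pvIdxs_append]
        simp only [Nat.zero_add]
        have h1 : pvIdxs ("O" :: List.replicate m ".") l'.length
            = l'.length :: pvIdxs (List.replicate m ".") (l'.length + 1) := by
          simp [pvIdxs]
        rw [h1, pvIdxs_nil_of_no_rock (List.replicate m ".")
          (fun y hy => by simp [List.eq_of_mem_replicate hy]) (l'.length + 1)]
      have hline : (l' ++ "O" :: List.replicate m ".") ++ List.replicate d "." ++ List.replicate r "O"
          = l' ++ "O" :: List.replicate (m + d) "." ++ List.replicate r "O" := by
        simp [List.append_assoc]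
      rw [hidx, List.reverse_append, hline]
      simp only [List.reverse_singleton, List.singleton_append, List.foldl_cons]
      have hrest : (List.replicate r "O" : List String) = [] ∨
          ∃ y t, (List.replicate r "O" : List String) = y :: t ∧ y ≠ "." := by
        cases r with
        | zero => left; simp
        | succ r => right; exact ⟨"O", List.replicate r "O", by simp [List.replicate_succ], by decide⟩
      have hadv : pvAdv (l' ++ "O" :: List.replicate (m + d) "." ++ List.replicate r "O") l'.length
          = l'.length + (m + d) := pvAdv_run (m + d) l' "O" (List.replicate r "O") hrest
      have hstepped : pvStep (l' ++ "O" :: List.replicate (m + d) "." ++ List.replicate r "O") l'.length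
          = l' ++ List.replicate (m + d) "." ++ List.replicate (r + 1) "O" := by
        simp only [pvStep]
        rw [hadv]
        cases hmd : m + d with
        | zero =>
          rw [if_neg (by omega)]
          simp [List.replicate_succ]
        | succ k =>
          rw [if_pos (by omega)]
          have h1 : l' ++ "O" :: List.replicate (k + 1) "." ++ List.replicate r "O"
              = (l' ++ "O" :: List.replicate k ".") ++ "." :: List.replicate r "O" := by
            simp [List.replicate_succ']
          have h2 : l'.length + (k + 1) = (l' ++ "O" :: List.replicate k ".").length := by
            simp
          rw [h1, h2, pvSet_at_length]
          have h3 : (l' ++ "O" :: List.replicate k ".") ++ "O" :: List.replicate r "O"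
              = l' ++ "O" :: (List.replicate k "." ++ "O" :: List.replicate r "O") := by
            simp
          rw [h3, pvSet_at_length]
          simp [List.replicate_succ]
      rw [hstepped]
      have hlen : l'.length < n := by
        subst hn; simp
      have := IH l'.length hlen l' rfl (fun y hy => hl' y hy) (m + d) (r + 1)
      rw [this]
      have hcd : (l' ++ "O" :: List.replicate m ".").count "." = l'.count "." + m := by
        simp [List.count_append]
      have hcO : (l' ++ "O" :: List.replicate m ".").count "O" = l'.count "O" + 1 := by
        simp [List.count_append, List.count_replicate]
      rw [hcd, hcO]
      congr 1
      · congr 1; omega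
      · congr 1; omega
    · -- no rocks: the fold is empty and pre is all dots
      have hnoO : ∀ x ∈ pre, x ≠ "O" := fun x hx h => hO (h ▸ hx)
      rw [pvIdxs_nil_of_no_rock pre hnoO 0]
      have hdots : pre = List.replicate pre.length "." := by
        apply List.eq_replicate_of_mem
        intro y hy
        rcases (show y = "." ∨ y = "O" by simpa [pvFree] using hpure y hy) with h | h
        · exact h
        · exact absurd h (hnoO y hy)
      have hcd : pre.count "." = pre.length := by
        conv_lhs => rw [hdots]
        simp
      have hcO : pre.count "O" = 0 := List.count_eq_zero.2 hO
      rw [List.reverse_nil, List.foldl_nil, hcd, hcO]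
      conv_lhs => rw [hdots]
      simp []

lemma pvAux_pure (l : List String) (hl : ∀ x ∈ l, pvFree x = true) :
    ∀ d r, pvAux l d r = List.replicate (d + l.count ".") "." ++ List.replicate (r + l.count "O") "O" := by
  induction l with
  | nil => intro d r; simp [pvAux]
  | cons x t ih =>
    intro d r
    have hx := hl x (by simp)
    have ht : ∀ y ∈ t, pvFree y = true := fun y hy => hl y (by simp [hy])
    rcases (show x = "." ∨ x = "O" by simpa [pvFree] using hx) with hx' | hx'
    · simp [pvAux, hx', ih ht (d + 1) r]
      all_goals omega
    · simp [pvAux, hx', ih ht d (r + 1)]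
      all_goals omega

lemma pvAux_barrier (seg : List String) (hseg : ∀ x ∈ seg, pvFree x = true)
    (b : String) (hb : pvFree b = false) (t : List String) :
    ∀ d r, pvAux (seg ++ b :: t) d r
      = List.replicate (d + seg.count ".") "." ++ List.replicate (r + seg.count "O") "O" ++ b :: pvAux t 0 0 := by
  have hbd : b ≠ "." := by rintro rfl; simp [pvFree] at hb
  have hbO : b ≠ "O" := by rintro rfl; simp [pvFree] at hb
  induction seg with
  | nil => intro d r; simp [pvAux, hbd, hbO]
  | cons x sg ih =>
    intro d r
    have hx := hseg x (by simp)
    have hsg : ∀ y ∈ sg, pvFree y = true := fun y hy => hseg y (by simp [hy])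
    rcases (show x = "." ∨ x = "O" by simpa [pvFree] using hx) with hx' | hx'
    · simp [pvAux, hx', ih hsg (d + 1) r]
      all_goals omega
    · simp [pvAux, hx', ih hsg d (r + 1)]
      all_goals omega

lemma pvSplit (l : List String) :
    (∀ x ∈ l, pvFree x = true) ∨
    ∃ seg b t, l = seg ++ b :: t ∧ (∀ x ∈ seg, pvFree x = true) ∧ pvFree b = false := by
  induction l with
  | nil => left; simp
  | cons x t ih =>
    by_cases hx : pvFree x = true
    · rcases ih with hpure | ⟨seg, b, t', rfl, hseg, hb⟩
      · left; intro y hy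
        rcases List.mem_cons.1 hy with rfl | hy
        · exact hx
        · exact hpure y hy
      · right
        exact ⟨x :: seg, b, t', rfl, fun y hy => by
          rcases List.mem_cons.1 hy with rfl | hy
          · exact hx
          · exact hseg y hy, hb⟩
    · right
      exact ⟨[], x, t, rfl, by simp, by simpa using hx⟩

-- the per-line equivalence
lemma pvTiltLine_eq_aux : ∀ (n : Nat) (l : List String), l.length = n → pvTiltLine l = pvAux l 0 0 := by
  intro n
  induction n using Nat.strong_induction_on with
  | _ n IH =>
    intro l hn
    rw [pvTiltLine, pvRocks_eq_idxs]
    rcases pvSplit l with hpure | ⟨seg, b, t, rfl, hseg, hb⟩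
    · have hcore := pvCore l.length l rfl hpure 0 0
      simp only [List.replicate_zero, List.append_nil] at hcore
      rw [hcore, pvAux_pure l hpure 0 0]
      simp
    · have hbO : b ≠ "O" := by rintro rfl; simp [pvFree] at hb
      have hbd : b ≠ "." := by rintro rfl; simp [pvFree] at hb
      have hidx : pvIdxs (seg ++ b :: t) 0
          = pvIdxs seg 0 ++ (pvIdxs t 0).map (· + (seg.length + 1)) := by
        rw [pvIdxs_append]
        simp only [Nat.zero_add]
        rw [show pvIdxs (b :: t) seg.length = pvIdxs t (seg.length + 1) by simp [pvIdxs, hbO]]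
        rw [pvIdxs_shift t (seg.length + 1)]
      rw [hidx, List.reverse_append, ← List.map_reverse, List.foldl_append]
      rw [pvFold_suffix seg b ((pvIdxs t 0).reverse) t
        (fun p hp => pvIdxs_lt t p (List.mem_reverse.1 hp))]
      rw [pvFold_prefix b hbd ((pvIdxs seg 0).reverse) seg _
        (fun p hp => pvIdxs_lt seg p (List.mem_reverse.1 hp))]
      have hcore := pvCore seg.length seg rfl hseg 0 0
      simp only [List.replicate_zero, List.append_nil] at hcore
      rw [hcore]
      have ht : List.foldl pvStep t (pvIdxs t 0).reverse = pvAux t 0 0 := by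
        have := IH t.length (by subst hn; simp; omega) t rfl
        rwa [pvTiltLine, pvRocks_eq_idxs] at this
      rw [ht, pvAux_barrier seg hseg b hb t 0 0]
      simp

lemma pvFoldlMin_le_init : ∀ (xs : List Nat) (a : Nat), xs.foldl min a ≤ a := by
  intro xs
  induction xs with
  | nil => intro a; simp
  | cons x t ih => intro a; exact le_trans (ih (min a x)) (by omega)

lemma pvFoldlMin_le_mem : ∀ (xs : List Nat) (a x : Nat), x ∈ xs → xs.foldl min a ≤ x := by
  intro xs
  induction xs with
  | nil => intro a x hx; simp at hx
  | cons y t ih =>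
    intro a x hx
    rcases List.mem_cons.1 hx with rfl | hx
    · exact le_trans (pvFoldlMin_le_init t (min a x)) (by omega)
    · exact ih (min a y) x hx

lemma pvLe_foldlMin : ∀ (xs : List Nat) (a k : Nat), k ≤ a → (∀ x ∈ xs, k ≤ x) →
    k ≤ xs.foldl min a := by
  intro xs
  induction xs with
  | nil => intro a k ha _; simpa using ha
  | cons x t ih =>
    intro a k ha hx
    exact ih (min a x) k (le_min ha (hx x (by simp))) (fun y hy => hx y (by simp [hy]))

lemma pvFoldlMin_sub_one : ∀ (xs : List Nat) (a : Nat),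
    (xs.map (fun x => x - 1)).foldl min (a - 1) = xs.foldl min a - 1 := by
  intro xs
  induction xs with
  | nil => intro a; simp
  | cons x t ih =>
    intro a
    have hmin : min (a - 1) (x - 1) = min a x - 1 := by omega
    simp only [List.map_cons, List.foldl_cons, hmin]
    exact ih (min a x)

-- characterisation of zip(*m)
lemma pvZipStar_eq : ∀ (n : Nat) (m : List (List String)), m ≠ [] → pvMinLen m = n →
    pvZipStar m = (List.range n).map (fun j => m.map (fun l => l.getD j "")) := by
  intro n
  induction n with
  | zero =>
    intro m hm h0
    rw [pvZipStar]
    have hno : ¬ (m ≠ [] ∧ m.all (fun l => !l.isEmpty) = true) := by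
      rintro ⟨-, hall⟩
      rcases m with _ | ⟨a, rest⟩
      · exact hm rfl
      · have hlen : ∀ l ∈ (a :: rest : List (List String)), 1 ≤ l.length := by
          intro l hl
          have := (List.all_eq_true.1 hall) l hl
          rcases l with _ | _ <;> simp_all
        have h1 : 1 ≤ pvMinLen (a :: rest) := by
          apply pvLe_foldlMin
          · exact hlen a (by simp)
          · intro x hx
            rcases List.mem_map.1 hx with ⟨l, hl, rfl⟩
            exact hlen l (by simp [hl])
        omega
    rw [dif_neg (by simpa using hno)]
    simp
  | succ n ih =>
    intro m hm hsucc
    have hone : 1 ≤ pvMinLen m := by omega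
    have hlenall : ∀ l ∈ m, 1 ≤ l.length := by
      intro l hl
      rcases m with _ | ⟨a, rest⟩
      · simp at hl
      · rcases List.mem_cons.1 hl with rfl | hl'
        · exact le_trans hone (pvFoldlMin_le_init _ _)
        · exact le_trans hone (pvFoldlMin_le_mem _ _ _ (List.mem_map.2 ⟨l, hl', rfl⟩))
    have hall : m.all (fun l => !l.isEmpty) = true := by
      rw [List.all_eq_true]
      intro l hl
      have := hlenall l hl
      rcases l with _ | _ <;> simp_all
    rw [pvZipStar, dif_pos ⟨hm, hall⟩]
    have htl : m.map List.tail ≠ [] := by simpa using hm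
    have hmin : pvMinLen (m.map List.tail) = n := by
      rcases m with _ | ⟨a, rest⟩
      · exact absurd rfl hm
      · have hmap : (rest.map List.tail).map List.length = (rest.map List.length).map (fun x => x - 1) := by
          simp only [List.map_map]
          apply List.map_congr_left
          intro l _
          simp [List.length_tail]
        show ((rest.map List.tail).map List.length).foldl min a.tail.length = n
        rw [hmap, List.length_tail, pvFoldlMin_sub_one]
        have : pvMinLen (a :: rest) = n + 1 := hsucc
        simp only [pvMinLen] at this
        omega
    rw [ih (m.map List.tail) htl hmin]
    rw [List.range_succ_eq_map]
    simp only [List.map_cons, List.map_map]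
    congr 1
    · apply List.map_congr_left
      intro l _
      rcases l with _ | _ <;> simp
    · apply List.map_congr_left
      intro j _
      simp only [Function.comp]
      apply List.map_congr_left
      intro l _
      rcases l with _ | _ <;> simp [Nat.succ_eq_add_one]

lemma pvTiltLine_eq (l : List String) : pvTiltLine l = pvTiltCol l := by
  rw [pvTiltLine_eq_aux l.length l rfl, pvTiltCol_eq_aux]

lemma pvCastFoldlMin : ∀ (xs : List (List String)) (a : Nat),
    (xs.map (fun r => (r.length : Int))).foldl min (a : Int)
      = (((xs.map List.length).foldl min a : Nat) : Int) := by
  intro xs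
  induction xs with
  | nil => intro a; simp
  | cons x t ih =>
    intro a
    simp only [List.map_cons, List.foldl_cons]
    rw [show min (a : Int) (x.length : Int) = ((min a x.length : Nat) : Int) by
      simp [Nat.cast_min]]
    exact ih (min a x.length)

-- ===== VERDICT (by name: the statement is the Claim_ definition above) =====
theorem rotate_and_tilt_counter_clockwise_spec : Claim_equal_rotate_and_tilt_counter_clockwise := by
  intro m _
  show rotate_and_tilt_counter_clockwise m = rotate_and_tilt_counter_clockwise_alt m
  rcases m with _ | ⟨a, rest⟩
  · rw [rotate_and_tilt_counter_clockwise, rotate_and_tilt_counter_clockwise_alt, pvZipStar]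
    simp
  · rw [rotate_and_tilt_counter_clockwise, rotate_and_tilt_counter_clockwise_alt]
    have hwidth : (PySem.List.min? ((a :: rest).map (fun row => (row.length : Int))) (fun x => x)).getD 0
        = ((pvMinLen (a :: rest) : Nat) : Int) := by
      simp only [List.map_cons]
      rw [PySem.List.min?_id_cons]
      simp only [Option.getD_some]
      simpa [pvMinLen] using pvCastFoldlMin rest a.length
    rw [hwidth]
    rw [pvZipStar_eq (pvMinLen (a :: rest)) (a :: rest) (by simp) rfl]
    rw [PySem.List.pyRange_one]
    simp only [List.map_map]
    rw [show ((pvMinLen (a :: rest) : Int) - 0).toNat = pvMinLen (a :: rest) by simp]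
    apply List.map_congr_left
    intro j _
    simp only [Function.comp]
    rw [show ((0 : Int) + (j : Int)) = ((j : Nat) : Int) by simp]
    rw [pvTiltLine_eq]
    congr 1
    rw [← List.map_reverse]
    apply List.map_congr_left
    intro l _
    rw [PySem.List.pyGetD_natCast]
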